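-- pv_equiv track=rewrite | github.com/lukius/mts | common/tools/base64.py | _remove_base64_padding
-- ===== SOURCE A (Python) =====
-- def _remove_base64_padding(string, bin_string):
--     if string.endswith('=='):
--         while len(bin_string) % 24 != 8:
--             bin_string = bin_string[:-1]
--     elif string.endswith('='):
--         while len(bin_string) % 24 != 16:
--             bin_string = bin_string[:-1]
--     return bin_string
-- ===== SOURCE B (Python) =====
-- def _remove_base64_padding(string, bin_string):
--     if string.endswith('=='):
--         target = 8
--     elif string.endswith('='):
--         target = 16
--     else:
--         return bin_string
--     extra = (len(bin_string) - target) % 24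
--     if extra == 0:
--         return bin_string
--     return bin_string[:len(bin_string) - extra]
-- ===== Notes on version B (the rewrite author's own statement) =====
-- stated objective: simpler
-- what changed: Replaces the character-at-a-time while loop with a closed form: extra = (len - target) % 24 computed once, then a single slice bin_string[:len-extra].
import Mathlib
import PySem

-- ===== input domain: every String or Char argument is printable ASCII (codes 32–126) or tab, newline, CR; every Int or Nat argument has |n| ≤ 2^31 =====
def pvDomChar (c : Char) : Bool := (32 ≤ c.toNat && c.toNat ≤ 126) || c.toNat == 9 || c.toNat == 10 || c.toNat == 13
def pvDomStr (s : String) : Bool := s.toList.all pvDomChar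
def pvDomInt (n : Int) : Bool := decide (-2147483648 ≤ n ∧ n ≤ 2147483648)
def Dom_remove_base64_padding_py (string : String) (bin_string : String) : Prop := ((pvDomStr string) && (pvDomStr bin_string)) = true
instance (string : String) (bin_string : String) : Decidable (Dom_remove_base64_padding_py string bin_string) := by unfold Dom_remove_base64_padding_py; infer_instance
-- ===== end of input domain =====

-- B replaces A's char-at-a-time trimming while loop by one closed-form slice (simpler: one modulus, one slice).

-- ===== PORT A =====
-- the while loop: trim one char while len % 24 ≠ target.  On [] with target ≠ 0 % 24
-- Python loops forever (bin_string[:-1] of '' is ''); we return [] there — such inputs are outside Pre_.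
def pvTrimA (target : Nat) (l : List Char) : List Char :=
  if l.length % 24 = target then l
  else if h : l = [] then []
  else pvTrimA target l.dropLast
termination_by l.length
decreasing_by
  cases l with
  | nil => exact absurd rfl h
  | cons a t => simp [List.length_dropLast]

def remove_base64_padding_py (string : String) (bin_string : String) : String :=
  if PySem.Str.endswith string "==" then String.ofList (pvTrimA 8 bin_string.toList)
  else if PySem.Str.endswith string "=" then String.ofList (pvTrimA 16 bin_string.toList)
  else bin_string

-- ===== PORT B =====
-- extra = (len - target) % 24 (Python %), then one slice bin_string[:len-extra]
def pvCutB (target : Int) (s : String) : String :=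
  if PySem.Int.mod ((s.toList.length : Int) - target) 24 = 0 then s
  else String.ofList (PySem.List.slice s.toList none
        (some ((s.toList.length : Int) - PySem.Int.mod ((s.toList.length : Int) - target) 24)))

def remove_base64_padding_py_alt (string : String) (bin_string : String) : String :=
  if PySem.Str.endswith string "==" then pvCutB 8 bin_string
  else if PySem.Str.endswith string "=" then pvCutB 16 bin_string
  else bin_string

-- ===== PRECONDITION & SPEC =====
-- Pre_ excludes exactly the inputs on which A never returns: with '==' padding A's loop
-- diverges when len(bin_string) < 8, and with a single '=' when len(bin_string) < 16
-- (the loop hits the empty string and spins forever).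
def Pre_remove_base64_padding_py (string : String) (bin_string : String) : Prop :=
  (PySem.Str.endswith string "==" = true → 8 ≤ bin_string.toList.length) ∧
  (PySem.Str.endswith string "==" = false → PySem.Str.endswith string "=" = true → 16 ≤ bin_string.toList.length)
instance (string : String) (bin_string : String) : Decidable (Pre_remove_base64_padding_py string bin_string) := by unfold Pre_remove_base64_padding_py; infer_instance

def pvWitness_remove_base64_padding_py : String × String := ("QQ==", "010000010000000000000000")

def Spec_remove_base64_padding_py (string : String) (bin_string : String) (out : String) : Prop := out = remove_base64_padding_py_alt string bin_string
instance (string : String) (bin_string : String) (out : String) : Decidable (Spec_remove_base64_padding_py string bin_string out) := by unfold Spec_remove_base64_padding_py; infer_instance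

-- ===== CLAIM (what is proved, stated in full; the proofs are below) =====
def Claim_equal_remove_base64_padding_py : Prop := ∀ (string : String) (bin_string : String), Dom_remove_base64_padding_py string bin_string → Pre_remove_base64_padding_py string bin_string → Spec_remove_base64_padding_py string bin_string (remove_base64_padding_py string bin_string)

-- ===== LEMMAS AND PROOFS =====

-- A's loop, characterised: for target < 24 and target ≤ len, it keeps the longest
-- prefix whose length ≡ target (mod 24).
theorem pvTrimA_eq_take (target : Nat) (ht : target < 24) :
    ∀ (k : Nat) (l : List Char), l.length ≤ k → target ≤ l.length →
      pvTrimA target l = l.take (l.length - (l.length - target) % 24) := by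
  intro k
  induction k with
  | zero =>
    intro l hk hle
    rw [pvTrimA]
    have h0 : l = [] := by cases l <;> simp_all
    have ht0 : target = 0 := by subst h0; simp at hle; omega
    simp [h0, ht0]
  | succ k ih =>
    intro l hk hle
    rw [pvTrimA]
    by_cases h : l.length % 24 = target
    · simp only [h, if_true]
      have : (l.length - target) % 24 = 0 := by omega
      simp [this]
    · simp only [h, if_false]
      have hne : l ≠ [] := by
        intro h0; subst h0; simp at hle h; omega
      have hpos : 0 < l.length := List.length_pos_iff.mpr hne
      simp only [hne, dite_false]
      have hlen : l.dropLast.length = l.length - 1 := by simp [List.length_dropLast]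
      have hk' : l.dropLast.length ≤ k := by omega
      have htgt : target ≤ l.dropLast.length := by omega
      rw [ih _ hk' htgt]
      have h1 : l.dropLast = l.take (l.length - 1) := by
        simp [List.dropLast_eq_take]
      rw [h1, List.take_take]
      simp only [List.length_take]
      congr 1
      omega

theorem remove_base64_padding_py_agree (target : Nat) (ht : target < 24) (s : String)
    (hle : target ≤ s.toList.length) :
    String.ofList (pvTrimA target s.toList) = pvCutB (target : Int) s := by
  unfold pvCutB
  rw [pvTrimA_eq_take target ht s.toList.length s.toList le_rfl hle]
  set n := s.toList.length with hn
  have hcast : (n : Int) - (target : Int) = ((n - target : Nat) : Int) := by push_cast; omega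
  rw [hcast]
  have hm : PySem.Int.mod (((n - target : Nat)) : Int) 24 = (((n - target) % 24 : Nat) : Int) := by
    simpa using PySem.Int.mod_natCast (n - target) 24
  rw [hm]
  by_cases h0 : (n - target) % 24 = 0
  · have hz : ((((n - target) % 24 : Nat)) : Int) = 0 := by exact_mod_cast h0
    rw [if_pos hz, h0, Nat.sub_zero, hn, List.take_length]
    exact String.ofList_toList
  · have hne : ((((n - target) % 24 : Nat)) : Int) ≠ 0 := by exact_mod_cast h0
    rw [if_neg hne]
    have h2 : (n : Int) - (((n - target) % 24 : Nat) : Int) = ((n - (n - target) % 24 : Nat) : Int) := by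
      have : (n - target) % 24 ≤ n := by omega
      push_cast; omega
    rw [h2, PySem.List.slice_to_natCast]

-- ===== VERDICT (by name: the statement is the Claim_ definition above) =====
theorem remove_base64_padding_py_spec : Claim_equal_remove_base64_padding_py := by
  intro string bin_string _ hpre
  unfold Spec_remove_base64_padding_py remove_base64_padding_py remove_base64_padding_py_alt
  by_cases h2 : PySem.Str.endswith string "==" = true
  · simp only [h2, if_true]
    exact remove_base64_padding_py_agree 8 (by norm_num) bin_string (hpre.1 h2)
  · have h2f : PySem.Str.endswith string "==" = false := by simpa using h2
    simp only [h2f, Bool.false_eq_true, if_false]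
    by_cases h1 : PySem.Str.endswith string "=" = true
    · simp only [h1, if_true]
      exact remove_base64_padding_py_agree 16 (by norm_num) bin_string (hpre.2 h2f h1)
    · have h1f : PySem.Str.endswith string "=" = false := by simpa using h1
      simp only [h1f, Bool.false_eq_true, if_false]
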